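-- pv_equiv track=rewrite | github.com/Jakub06/Emotional-Sort- | EmotionalSort.py | sort_emotions
-- ===== SOURCE A (Python) =====
-- def sort_emotions(arr, order):
--     superhappy=[]
--     happy=[]
--     normal=[]
--     sad=[]
--     supersad=[]
--     calosc=[]
--     for i in arr:
--         if i[0]!=':':
--             supersad.append(i)
--         else:
--             if i[1]=='D':
--                 superhappy.append(i)
--             if i[1]==')':
--                 happy.append(i)
--             if i[1]=='|':
--                 normal.append(i)
--             if i[1]=='(':
--                 sad.append(i)
--
--     for i in superhappy:
--         calosc.append(i)
--     for i in happy: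
--         calosc.append(i)
--     for i in normal:
--         calosc.append(i)
--     for i in sad:
--         calosc.append(i)
--     for i in supersad:
--         calosc.append(i)
--     if order==True:
--         return calosc
--     if order == False:
--         calosc.reverse()
--         return calosc
-- ===== SOURCE B (Python) =====
-- def sort_emotions(arr, order):
--     # Rank each emoticon 0-4; stable sort by rank reproduces A's bucket order.
--     def rank(i):
--         if i[0] != ':':
--             return 4
--         return {'D': 0, ')': 1, '|': 2, '(': 3}.get(i[1])
--     ranked = [(rank(i), i) for i in arr if rank(i) is not None]
--     res = [i for _, i in sorted(ranked, key=lambda p: p[0])]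
--     return res if order else list(reversed(res))
-- ===== Notes on version B (the rewrite author's own statement) =====
-- stated objective: idiomatic
-- what changed: Replaces the five explicit bucket lists and their concatenation loops with a rank function (0-4 per emoticon) plus Python's stable sorted(), which preserves intra-category input order.
import Mathlib
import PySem

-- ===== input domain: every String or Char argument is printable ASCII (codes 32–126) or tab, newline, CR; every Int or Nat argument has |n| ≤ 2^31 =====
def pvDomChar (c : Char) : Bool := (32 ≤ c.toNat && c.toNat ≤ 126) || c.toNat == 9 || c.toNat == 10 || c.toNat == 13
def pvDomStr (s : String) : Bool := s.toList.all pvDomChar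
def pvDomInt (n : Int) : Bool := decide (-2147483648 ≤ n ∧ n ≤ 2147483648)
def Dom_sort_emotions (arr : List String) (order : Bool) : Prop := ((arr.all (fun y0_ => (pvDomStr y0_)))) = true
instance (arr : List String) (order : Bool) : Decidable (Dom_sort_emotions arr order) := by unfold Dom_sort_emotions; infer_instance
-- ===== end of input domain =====

-- B replaces A's five bucket lists with a 0-4 rank function and a stable sort by rank (idiomatic; same result, proved on nonempty strings where A does not raise).


-- ===== PORT A =====
-- A's loop over arr keeping five bucket lists, then the five concatenation loops, then order dispatch.
def sort_emotions (arr : List String) (order : Bool) : List String :=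
  let st := arr.foldl
    (fun (s : List String × List String × List String × List String × List String) i =>
      let superhappy := s.1
      let happy := s.2.1
      let normal := s.2.2.1
      let sad := s.2.2.2.1
      let supersad := s.2.2.2.2
      if (PySem.Str.pyGet? i 0).getD ' ' ≠ ':' then
        (superhappy, happy, normal, sad, supersad ++ [i])
      else
        let c := (PySem.Str.pyGet? i 1).getD ' '
        let superhappy := if c = 'D' then superhappy ++ [i] else superhappy
        let happy := if c = ')' then happy ++ [i] else happy
        let normal := if c = '|' then normal ++ [i] else normal
        let sad := if c = '(' then sad ++ [i] else sad
        (superhappy, happy, normal, sad, supersad))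
    ([], [], [], [], [])
  let calosc := st.1 ++ st.2.1 ++ st.2.2.1 ++ st.2.2.2.1 ++ st.2.2.2.2
  if order then calosc else calosc.reverse

-- ===== PORT B =====
-- Source B's rank dict {'D':0, ')':1, '|':2, '(':3}
def sort_emotions_rankDict : PySem.Dict Char Int := ⟨[('D', 0), (')', 1), ('|', 2), ('(', 3)]⟩

-- Source B's rank: 4 for non-':' heads, else dict lookup on the second char (none = dropped).
def sort_emotions_rank (i : String) : Option Int :=
  if (PySem.Str.pyGet? i 0).getD ' ' ≠ ':' then some (4 : Int)
  else PySem.Dict.get? sort_emotions_rankDict ((PySem.Str.pyGet? i 1).getD ' ')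

def sort_emotions_alt (arr : List String) (order : Bool) : List String :=
  let ranked := arr.filterMap (fun i => (sort_emotions_rank i).map (fun r => (r, i)))
  let res := (PySem.List.sorted ranked (fun p : Int × String => p.1) false).map (fun p => p.2)
  if order then res else res.reverse

-- ===== PRECONDITION & SPEC =====
-- Pre_ excludes exactly the inputs where A raises IndexError: an empty string (i[0]) or a one-char string starting with ':' (i[1]).
def Pre_sort_emotions (arr : List String) (order : Bool) : Prop :=
  ∀ i ∈ arr, i.toList ≠ [] ∧ (i.toList.head? = some ':' → 2 ≤ i.toList.length)
instance (arr : List String) (order : Bool) : Decidable (Pre_sort_emotions arr order) := by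
  unfold Pre_sort_emotions; infer_instance

def pvWitness_sort_emotions : List String × Bool := ([":D", "xx", ":(", ":)", ":x", ":|"], false)

def Spec_sort_emotions (arr : List String) (order : Bool) (out : List String) : Prop := out = sort_emotions_alt arr order
instance (arr : List String) (order : Bool) (out : List String) : Decidable (Spec_sort_emotions arr order out) := by unfold Spec_sort_emotions; infer_instance

-- ===== CLAIM (what is proved, stated in full; the proofs are below) =====
def Claim_equal_sort_emotions : Prop := ∀ (arr : List String) (order : Bool), Dom_sort_emotions arr order → Pre_sort_emotions arr order → Spec_sort_emotions arr order (sort_emotions arr order)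

-- ===== LEMMAS AND PROOFS =====

-- items of a ranked list whose rank is k
def pvBucket (k : Int) (xs : List (Int × String)) : List (Int × String) :=
  xs.filter (fun p => p.1 == k)

theorem pvRank_bounds (i : String) (r : Int) (h : sort_emotions_rank i = some r) :
    0 ≤ r ∧ r ≤ 4 := by
  unfold sort_emotions_rank at h
  split at h
  · simp only [Option.some.injEq] at h; omega
  · set c := (PySem.Str.pyGet? i 1).getD ' ' with hc
    by_cases h1 : c = 'D'
    · simp [sort_emotions_rankDict, PySem.Dict.get?, h1] at h; omega
    · by_cases h2 : c = ')'
      · simp [sort_emotions_rankDict, PySem.Dict.get?, h2, Ne.symm h1] at h; omega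
      · by_cases h3 : c = '|'
        · simp [sort_emotions_rankDict, PySem.Dict.get?, h3, Ne.symm h1, Ne.symm h2] at h; omega
        · by_cases h4 : c = '('
          · simp [sort_emotions_rankDict, PySem.Dict.get?, h4, Ne.symm h1, Ne.symm h2, Ne.symm h3] at h; omega
          · simp [sort_emotions_rankDict, PySem.Dict.get?, Ne.symm h1, Ne.symm h2, Ne.symm h3, Ne.symm h4] at h

theorem pvInsertBy_skip (x : Int × String) (ys zs : List (Int × String))
    (h : ∀ y ∈ ys, ¬ x.1 < y.1) :
    PySem.List.insertBy (fun a b => decide (a.1 < b.1)) x (ys ++ zs)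
      = ys ++ PySem.List.insertBy (fun a b => decide (a.1 < b.1)) x zs := by
  induction ys with
  | nil => simp
  | cons y t ih =>
    have hy : ¬ x.1 < y.1 := h y (by simp)
    simp [PySem.List.insertBy, hy, ih (fun z hz => h z (by simp [hz]))]

theorem pvInsertBy_front (x : Int × String) (zs : List (Int × String))
    (h : ∀ z ∈ zs, x.1 < z.1) :
    PySem.List.insertBy (fun a b => decide (a.1 < b.1)) x zs = x :: zs := by
  cases zs with
  | nil => simp [PySem.List.insertBy]
  | cons z t => simp [PySem.List.insertBy, h z (by simp)]

theorem pvMem_bucket {k : Int} {xs : List (Int × String)} {p : Int × String}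
    (h : p ∈ pvBucket k xs) : p.1 = k := by
  unfold pvBucket at h
  simp at h
  exact h.2

-- stable sort of a 0..4-ranked list is the concatenation of its rank buckets
theorem pvSorted_buckets (xs : List (Int × String))
    (hb : ∀ p ∈ xs, 0 ≤ p.1 ∧ p.1 ≤ 4) :
    PySem.List.sorted xs (fun p : Int × String => p.1) false
      = pvBucket 0 xs ++ pvBucket 1 xs ++ pvBucket 2 xs ++ pvBucket 3 xs ++ pvBucket 4 xs := by
  induction xs using List.reverseRecOn with
  | nil => simp [PySem.List.sorted, pvBucket]
  | append_singleton xs x ih =>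
    have hb' : ∀ p ∈ xs, 0 ≤ p.1 ∧ p.1 ≤ 4 := fun p hp => hb p (by simp [hp])
    have hx : 0 ≤ x.1 ∧ x.1 ≤ 4 := hb x (by simp)
    have hsorted : PySem.List.sorted (xs ++ [x]) (fun p : Int × String => p.1) false
        = PySem.List.insertBy (fun a b => decide (a.1 < b.1)) x
            (PySem.List.sorted xs (fun p : Int × String => p.1) false) := by
      rw [PySem.List.sorted_eq_foldl_insertBy, PySem.List.sorted_eq_foldl_insertBy,
        List.foldl_append]
      rfl
    rw [hsorted, ih hb']
    have hbkt_eq : ∀ k : Int, x.1 = k → pvBucket k (xs ++ [x]) = pvBucket k xs ++ [x] := by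
      intro k hk
      unfold pvBucket
      simp [List.filter_append, hk]
    have hbkt_ne : ∀ k : Int, x.1 ≠ k → pvBucket k (xs ++ [x]) = pvBucket k xs := by
      intro k hk
      unfold pvBucket
      simp [List.filter_append, hk]
    have hskip : ∀ (k : Int), k ≤ x.1 → ∀ y ∈ pvBucket k xs, ¬ x.1 < y.1 := by
      intro k hk y hy
      have hyk := pvMem_bucket hy
      omega
    have hfronts : ∀ (k : Int) (y : Int × String),
        (y ∈ pvBucket k xs) → x.1 < k → x.1 < y.1 := by
      intro k y hy hk
      have hyk := pvMem_bucket hy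
      omega
    have hxk : x.1 = 0 ∨ x.1 = 1 ∨ x.1 = 2 ∨ x.1 = 3 ∨ x.1 = 4 := by omega
    rcases hxk with hk | hk | hk | hk | hk
    · rw [hbkt_eq 0 hk, hbkt_ne 1 (by omega), hbkt_ne 2 (by omega), hbkt_ne 3 (by omega),
        hbkt_ne 4 (by omega)]
      simp only [List.append_assoc, List.cons_append, List.singleton_append]
      rw [pvInsertBy_skip x (pvBucket 0 xs) _ (hskip 0 (by omega)),
        pvInsertBy_front x _ (by
          intro z hz
          simp only [List.mem_append] at hz
          rcases hz with h1 | h1 | h1 | h1 <;>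
            [exact hfronts 1 z h1 (by omega); exact hfronts 2 z h1 (by omega);
             exact hfronts 3 z h1 (by omega); exact hfronts 4 z h1 (by omega)])]
      simp
    · rw [hbkt_ne 0 (by omega), hbkt_eq 1 hk, hbkt_ne 2 (by omega), hbkt_ne 3 (by omega),
        hbkt_ne 4 (by omega)]
      simp only [List.append_assoc, List.cons_append, List.singleton_append]
      rw [pvInsertBy_skip x (pvBucket 0 xs) _ (hskip 0 (by omega)),
        pvInsertBy_skip x (pvBucket 1 xs) _ (hskip 1 (by omega)),
        pvInsertBy_front x _ (by
          intro z hz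
          simp only [List.mem_append] at hz
          rcases hz with h1 | h1 | h1 <;>
            [exact hfronts 2 z h1 (by omega); exact hfronts 3 z h1 (by omega);
             exact hfronts 4 z h1 (by omega)])]
      simp
    · rw [hbkt_ne 0 (by omega), hbkt_ne 1 (by omega), hbkt_eq 2 hk, hbkt_ne 3 (by omega),
        hbkt_ne 4 (by omega)]
      simp only [List.append_assoc, List.cons_append, List.singleton_append]
      rw [pvInsertBy_skip x (pvBucket 0 xs) _ (hskip 0 (by omega)),
        pvInsertBy_skip x (pvBucket 1 xs) _ (hskip 1 (by omega)),
        pvInsertBy_skip x (pvBucket 2 xs) _ (hskip 2 (by omega)),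
        pvInsertBy_front x _ (by
          intro z hz
          simp only [List.mem_append] at hz
          rcases hz with h1 | h1 <;>
            [exact hfronts 3 z h1 (by omega); exact hfronts 4 z h1 (by omega)])]
      simp
    · rw [hbkt_ne 0 (by omega), hbkt_ne 1 (by omega), hbkt_ne 2 (by omega), hbkt_eq 3 hk,
        hbkt_ne 4 (by omega)]
      simp only [List.append_assoc, List.cons_append, List.singleton_append]
      rw [pvInsertBy_skip x (pvBucket 0 xs) _ (hskip 0 (by omega)),
        pvInsertBy_skip x (pvBucket 1 xs) _ (hskip 1 (by omega)),
        pvInsertBy_skip x (pvBucket 2 xs) _ (hskip 2 (by omega)),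
        pvInsertBy_skip x (pvBucket 3 xs) _ (hskip 3 (by omega)),
        pvInsertBy_front x _ (fun z hz => hfronts 4 z hz (by omega))]
      simp
    · rw [hbkt_ne 0 (by omega), hbkt_ne 1 (by omega), hbkt_ne 2 (by omega), hbkt_ne 3 (by omega),
        hbkt_eq 4 hk]
      simp only [List.append_assoc, List.cons_append, List.singleton_append]
      rw [pvInsertBy_skip x (pvBucket 0 xs) _ (hskip 0 (by omega)),
        pvInsertBy_skip x (pvBucket 1 xs) _ (hskip 1 (by omega)),
        pvInsertBy_skip x (pvBucket 2 xs) _ (hskip 2 (by omega)),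
        pvInsertBy_skip x (pvBucket 3 xs) _ (hskip 3 (by omega)),
        PySem.List.insertBy_of_forall_not_before _ x (pvBucket 4 xs) (by
          intro y hy
          have := pvMem_bucket hy
          simp only [decide_eq_false_iff_not]
          omega)]

-- the ranked list of arr and its per-rank string projections
def pvRanked (arr : List String) : List (Int × String) :=
  arr.filterMap (fun i => (sort_emotions_rank i).map (fun r => (r, i)))

def pvX (k : Int) (arr : List String) : List String :=
  (pvBucket k (pvRanked arr)).map (fun p => p.2)

theorem pvX_cons (i : String) (rest : List String) (k : Int) :
    pvX k (i :: rest)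
      = (if sort_emotions_rank i = some k then [i] else []) ++ pvX k rest := by
  simp only [pvX, pvRanked, pvBucket, List.filterMap_cons]
  cases hr : sort_emotions_rank i with
  | none => simp
  | some r =>
    by_cases hk : r = k <;> simp [hk]

def pvStepA (s : List String × List String × List String × List String × List String)
    (i : String) : List String × List String × List String × List String × List String :=
  let superhappy := s.1
  let happy := s.2.1
  let normal := s.2.2.1
  let sad := s.2.2.2.1
  let supersad := s.2.2.2.2
  if (PySem.Str.pyGet? i 0).getD ' ' ≠ ':' then
    (superhappy, happy, normal, sad, supersad ++ [i])
  else
    let c := (PySem.Str.pyGet? i 1).getD ' '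
    let superhappy := if c = 'D' then superhappy ++ [i] else superhappy
    let happy := if c = ')' then happy ++ [i] else happy
    let normal := if c = '|' then normal ++ [i] else normal
    let sad := if c = '(' then sad ++ [i] else sad
    (superhappy, happy, normal, sad, supersad)

theorem pvFoldA (arr : List String)
    (hpre : ∀ i ∈ arr, i.toList ≠ [] ∧ (i.toList.head? = some ':' → 2 ≤ i.toList.length)) :
    ∀ s0 h0 n0 sa0 ss0 : List String,
    arr.foldl pvStepA (s0, h0, n0, sa0, ss0)
      = (s0 ++ pvX 0 arr, h0 ++ pvX 1 arr, n0 ++ pvX 2 arr, sa0 ++ pvX 3 arr, ss0 ++ pvX 4 arr) := by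
  induction arr with
  | nil =>
    intro s0 h0 n0 sa0 ss0
    simp [pvX, pvRanked, pvBucket]
  | cons i rest ih =>
    intro s0 h0 n0 sa0 ss0
    obtain ⟨hne, hlen⟩ := hpre i (List.mem_cons_self)
    have hrest : ∀ j ∈ rest, j.toList ≠ [] ∧ (j.toList.head? = some ':' → 2 ≤ j.toList.length) :=
      fun j hj => hpre j (List.mem_cons_of_mem _ hj)
    obtain ⟨c, cs, hts⟩ : ∃ c cs, i.toList = c :: cs := by
      cases h' : i.toList with
      | nil => exact absurd h' hne
      | cons a b => exact ⟨a, b, rfl⟩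
    have hg0 : PySem.Str.pyGet? i 0 = some c := by
      simp [PySem.Str.pyGet?, PySem.List.pyGet?, PySem.List.pyIdx?, hts]
    have hG0 : PySem.List.pyGet? i.toList 0 = some c := by
      simp [PySem.List.pyGet?, PySem.List.pyIdx?, hts]
    rw [List.foldl_cons]
    by_cases hc : c = ':'
    · -- ':' head: the four branches on the second character
      obtain ⟨c1, cs', hcs⟩ : ∃ c1 cs', cs = c1 :: cs' := by
        have h2 : 2 ≤ i.toList.length := hlen (by simp [hts, hc])
        cases h' : cs with
        | nil => rw [hts, h'] at h2; simp at h2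
        | cons a b => exact ⟨a, b, rfl⟩
      have hg1 : PySem.Str.pyGet? i 1 = some c1 := by
        simp [PySem.Str.pyGet?, PySem.List.pyGet?, PySem.List.pyIdx?, hts, hcs]
      have hG1 : PySem.List.pyGet? i.toList 1 = some c1 := by
        simp [PySem.List.pyGet?, PySem.List.pyIdx?, hts, hcs]
      have hrk : sort_emotions_rank i
          = PySem.Dict.get? sort_emotions_rankDict c1 := by
        unfold sort_emotions_rank
        rw [hg0, hg1]
        simp [hc]
      by_cases h1 : c1 = 'D'
      · have hr : sort_emotions_rank i = some 0 := by
          simp [hrk, h1, sort_emotions_rankDict, PySem.Dict.get?]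
        have hstep : pvStepA (s0, h0, n0, sa0, ss0) i = (s0 ++ [i], h0, n0, sa0, ss0) := by
          unfold pvStepA
          simp [hg0, hG0, hg1, hG1, hc, h1]
        rw [hstep, ih hrest]
        simp [pvX_cons, hr]
      · by_cases h2 : c1 = ')'
        · have hr : sort_emotions_rank i = some 1 := by
            simp [hrk, h2, sort_emotions_rankDict, PySem.Dict.get?, Ne.symm h1]
          have hstep : pvStepA (s0, h0, n0, sa0, ss0) i = (s0, h0 ++ [i], n0, sa0, ss0) := by
            unfold pvStepA
            simp [hg0, hG0, hg1, hG1, hc, h1, h2]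
          rw [hstep, ih hrest]
          simp [pvX_cons, hr]
        · by_cases h3 : c1 = '|'
          · have hr : sort_emotions_rank i = some 2 := by
              simp [hrk, h3, sort_emotions_rankDict, PySem.Dict.get?, Ne.symm h1, Ne.symm h2]
            have hstep : pvStepA (s0, h0, n0, sa0, ss0) i = (s0, h0, n0 ++ [i], sa0, ss0) := by
              unfold pvStepA
              simp [hg0, hG0, hg1, hG1, hc, h1, h2, h3]
            rw [hstep, ih hrest]
            simp [pvX_cons, hr]
          · by_cases h4 : c1 = '('
            · have hr : sort_emotions_rank i = some 3 := by
                simp [hrk, h4, sort_emotions_rankDict, PySem.Dict.get?,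
                  Ne.symm h1, Ne.symm h2, Ne.symm h3]
              have hstep : pvStepA (s0, h0, n0, sa0, ss0) i = (s0, h0, n0, sa0 ++ [i], ss0) := by
                unfold pvStepA
                simp [hg0, hG0, hg1, hG1, hc, h1, h2, h3, h4]
              rw [hstep, ih hrest]
              simp [pvX_cons, hr]
            · have hr : sort_emotions_rank i = none := by
                simp [hrk, sort_emotions_rankDict, PySem.Dict.get?,
                  Ne.symm h1, Ne.symm h2, Ne.symm h3, Ne.symm h4]
              have hstep : pvStepA (s0, h0, n0, sa0, ss0) i = (s0, h0, n0, sa0, ss0) := by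
                unfold pvStepA
                simp [hg0, hG0, hg1, hG1, hc, h1, h2, h3, h4]
              rw [hstep, ih hrest]
              simp [pvX_cons, hr]
    · -- non-':' head: supersad, rank 4
      have hr : sort_emotions_rank i = some 4 := by
        unfold sort_emotions_rank
        rw [hg0]
        simp [hc]
      have hstep : pvStepA (s0, h0, n0, sa0, ss0) i = (s0, h0, n0, sa0, ss0 ++ [i]) := by
        unfold pvStepA
        simp [hg0, hG0, hc]
      rw [hstep, ih hrest]
      simp [pvX_cons, hr]

-- ===== VERDICT (by name: the statement is the Claim_ definition above) =====
theorem sort_emotions_spec : Claim_equal_sort_emotions := by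
  intro arr order _ hpre
  unfold Spec_sort_emotions
  show (let st := arr.foldl pvStepA ([], [], [], [], [])
        let calosc := st.1 ++ st.2.1 ++ st.2.2.1 ++ st.2.2.2.1 ++ st.2.2.2.2
        if order then calosc else calosc.reverse)
      = sort_emotions_alt arr order
  unfold sort_emotions_alt
  have hb : ∀ p ∈ pvRanked arr, 0 ≤ p.1 ∧ p.1 ≤ 4 := by
    intro p hp
    simp only [pvRanked, List.mem_filterMap, Option.map_eq_some_iff] at hp
    obtain ⟨i, _, r, hr, hpr⟩ := hp
    have := pvRank_bounds i r hr
    rw [← hpr]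
    exact this
  have hrk : arr.filterMap (fun i => (sort_emotions_rank i).map (fun r => (r, i)))
      = pvRanked arr := rfl
  simp only [hrk]
  rw [pvFoldA arr hpre, pvSorted_buckets (pvRanked arr) hb]
  cases order <;> simp [pvX, List.map_append]
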